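-- pv_equiv track=rewrite | github.com/SemyonBevzuk/DeepLearningLabs | lab2/src/reporthandler.py | find_old_table
-- ===== SOURCE A (Python) =====
-- def find_old_table(lines, open_tag, close_tag):
--     table_start_index = 0
--     table_end_index = 0
--     for i, line in enumerate(lines):
--         if line == open_tag:
--             table_start_index = i
--         if line == close_tag:
--             table_end_index = i
--             break
--     return (table_start_index, table_end_index)
-- ===== SOURCE B (Python) =====
-- def find_old_table(lines, open_tag, close_tag):
--     try:
--         end = lines.index(close_tag)
--         search = lines[:end + 1]
--     except ValueError:
--         end = 0
--         search = lines
--     start = 0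
--     for i, line in enumerate(search):
--         if line == open_tag:
--             start = i
--     return (start, end)
-- ===== Notes on version B (the rewrite author's own statement) =====
-- stated objective: alternative
-- what changed: A's single early-exit loop carrying both indices is replaced by two independent passes: list.index finds the first close_tag, then a last-match scan over the slice up to it (or the whole list if absent) finds the start.
import Mathlib
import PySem

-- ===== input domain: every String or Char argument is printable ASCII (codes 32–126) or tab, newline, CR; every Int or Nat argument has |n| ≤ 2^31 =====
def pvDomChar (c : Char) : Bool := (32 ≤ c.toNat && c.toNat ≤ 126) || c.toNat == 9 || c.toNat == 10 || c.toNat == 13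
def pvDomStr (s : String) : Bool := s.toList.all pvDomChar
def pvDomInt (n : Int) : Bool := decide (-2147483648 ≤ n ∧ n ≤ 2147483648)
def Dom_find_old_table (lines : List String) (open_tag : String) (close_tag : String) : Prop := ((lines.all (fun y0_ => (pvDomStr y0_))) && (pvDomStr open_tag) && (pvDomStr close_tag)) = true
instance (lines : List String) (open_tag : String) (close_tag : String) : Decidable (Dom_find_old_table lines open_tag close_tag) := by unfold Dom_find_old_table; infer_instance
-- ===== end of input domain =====

-- B replaces A's single early-exit loop with two independent passes (index() for the end,
-- a last-match scan over the relevant prefix for the start); alternative decomposition, same cost.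

-- ===== PORT A =====
-- A's loop: enumerate with early break, threading (table_start_index, table_end_index).
def findOldTableLoop (o c : String) : List String → Int → Int → Int → Int × Int
  | [], _, s, e => (s, e)
  | l :: rest, i, s, e =>
    let s' := if l == o then i else s
    if l == c then (s', i) else findOldTableLoop o c rest (i + 1) s' e

def find_old_table (lines : List String) (open_tag : String) (close_tag : String) : Int × Int :=
  findOldTableLoop open_tag close_tag lines 0 0 0

-- ===== PORT B =====
-- last-match scan: for i, line in enumerate(search): if line == open_tag: start = i
def lastOpenIdx (search : List String) (o : String) : Int :=
  (PySem.List.enumerate search 0).foldl (fun s p => if p.2 == o then p.1 else s) 0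

def find_old_table_alt (lines : List String) (open_tag : String) (close_tag : String) : Int × Int :=
  match PySem.List.index? lines close_tag with
  | some e => (lastOpenIdx (PySem.List.slice lines none (some ((e : Int) + 1))) open_tag, (e : Int))
  | none => (lastOpenIdx lines open_tag, 0)

-- ===== PRECONDITION & SPEC =====
def Spec_find_old_table (lines : List String) (open_tag : String) (close_tag : String) (out : Int × Int) : Prop := out = find_old_table_alt lines open_tag close_tag
instance (lines : List String) (open_tag : String) (close_tag : String) (out : Int × Int) : Decidable (Spec_find_old_table lines open_tag close_tag out) := by unfold Spec_find_old_table; infer_instance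

-- ===== CLAIM (what is proved, stated in full; the proofs are below) =====
def Claim_equal_find_old_table : Prop := ∀ (lines : List String) (open_tag : String) (close_tag : String), Dom_find_old_table lines open_tag close_tag → Spec_find_old_table lines open_tag close_tag (find_old_table lines open_tag close_tag)

-- ===== LEMMAS AND PROOFS =====

-- the last-match fold with an arbitrary starting index/accumulator
def foldFrom (o : String) (xs : List String) (i s : Int) : Int :=
  (PySem.List.enumerate xs i).foldl (fun acc p => if p.2 == o then p.1 else acc) s

theorem foldFrom_nil (o : String) (i s : Int) : foldFrom o [] i s = s := by
  simp [foldFrom, PySem.List.enumerate_nil]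

theorem foldFrom_cons (o : String) (l : String) (rest : List String) (i s : Int) :
    foldFrom o (l :: rest) i s = foldFrom o rest (i + 1) (if l == o then i else s) := by
  simp [foldFrom, PySem.List.enumerate_cons]

theorem loop_characterization (o c : String) (lines : List String) :
    ∀ (i s e : Int), findOldTableLoop o c lines i s e =
      match PySem.List.index? lines c with
      | none => (foldFrom o lines i s, e)
      | some k => (foldFrom o (lines.take (k + 1)) i s, i + (k : Int)) := by
  induction lines with
  | nil =>
    intro i s e
    simp [findOldTableLoop, PySem.List.index?, foldFrom_nil]
  | cons l rest ih =>
    intro i s e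
    by_cases hc : l == c
    · have hl : l = c := by simpa using hc
      subst hl
      rw [PySem.List.index?_cons_self]
      simp [findOldTableLoop, List.take, foldFrom_cons, foldFrom_nil]
    · have hne : l ≠ c := by simpa using hc
      rw [PySem.List.index?_cons_of_ne rest hne]
      simp only [findOldTableLoop, hc]
      rw [ih (i + 1) (if l == o then i else s) e]
      cases hk : PySem.List.index? rest c with
      | none => simp [foldFrom_cons]
      | some k =>
        simp only [Option.map_some, Bool.false_eq_true, if_false, List.take_succ_cons,
          Prod.mk.injEq]
        rw [foldFrom_cons]
        refine ⟨rfl, ?_⟩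
        push_cast
        ring

theorem find_old_table_eq_alt (lines : List String) (o c : String) :
    find_old_table lines o c = find_old_table_alt lines o c := by
  unfold find_old_table find_old_table_alt
  rw [loop_characterization]
  cases hk : PySem.List.index? lines c with
  | none => rfl
  | some k =>
    have hslice : PySem.List.slice lines none (some ((k : Int) + 1)) = lines.take (k + 1) := by
      have := PySem.List.slice_to_natCast lines (k + 1)
      push_cast at this ⊢
      exact this
    simp [hslice, lastOpenIdx, foldFrom]

-- ===== VERDICT (by name: the statement is the Claim_ definition above) =====
theorem find_old_table_spec : Claim_equal_find_old_table := by
  intro lines o c _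
  unfold Spec_find_old_table
  exact find_old_table_eq_alt lines o c
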